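-- pv_equiv track=rewrite | github.com/kyj519/CombineFactory | RunIIVcb/validation_json_to_md.py | collect_metric_columns
-- ===== SOURCE A (Python) =====
-- from typing import Any, Dict, Iterable, Iterator, List, Sequence, Tuple
--
-- ID_FIELDS: Sequence[str] = ("nuisance", "channel", "process", "path")
--
-- PREFERRED_METRICS: Sequence[str] = (
--     "value_u",
--     "value_d",
--     "diff_u",
--     "diff_d",
--     "count",
--     "items",
--     "value",
-- )
--
-- def collect_metric_columns(rows: List[Dict[str, Any]]) -> List[str]:
--     metrics = set()
--     for row in rows:
--         for key in row:
--             if key in ID_FIELDS or key == "severity":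
--                 continue
--             metrics.add(key)
--
--     ordered: List[str] = [k for k in PREFERRED_METRICS if k in metrics]
--     ordered.extend(sorted(k for k in metrics if k not in set(ordered)))
--     return ordered
-- ===== SOURCE B (Python) =====
-- from typing import Any, Dict, List, Sequence
--
-- ID_FIELDS: Sequence[str] = ("nuisance", "channel", "process", "path")
--
-- PREFERRED_METRICS: Sequence[str] = (
--     "value_u",
--     "value_d",
--     "diff_u",
--     "diff_d",
--     "count",
--     "items",
--     "value",
-- )
--
-- def collect_metric_columns(rows: List[Dict[str, Any]]) -> List[str]:
--     metrics = set()
--     for row in rows: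
--         for key in row:
--             if key in ID_FIELDS or key == "severity":
--                 continue
--             metrics.add(key)
--     rank = {name: i for i, name in enumerate(PREFERRED_METRICS)}
--     return sorted(metrics, key=lambda k: (rank.get(k, len(PREFERRED_METRICS)), k))
-- ===== Notes on version B (the rewrite author's own statement) =====
-- stated objective: idiomatic
-- what changed: Replaces A's two shaped passes (preferred-order filter comprehension plus a separate sorted() of the leftovers, glued with extend) by one single ranked sort: a rank table over PREFERRED_METRICS and sorted(metrics, key=(rank.get(k, sentinel), k)).
import Mathlib
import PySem

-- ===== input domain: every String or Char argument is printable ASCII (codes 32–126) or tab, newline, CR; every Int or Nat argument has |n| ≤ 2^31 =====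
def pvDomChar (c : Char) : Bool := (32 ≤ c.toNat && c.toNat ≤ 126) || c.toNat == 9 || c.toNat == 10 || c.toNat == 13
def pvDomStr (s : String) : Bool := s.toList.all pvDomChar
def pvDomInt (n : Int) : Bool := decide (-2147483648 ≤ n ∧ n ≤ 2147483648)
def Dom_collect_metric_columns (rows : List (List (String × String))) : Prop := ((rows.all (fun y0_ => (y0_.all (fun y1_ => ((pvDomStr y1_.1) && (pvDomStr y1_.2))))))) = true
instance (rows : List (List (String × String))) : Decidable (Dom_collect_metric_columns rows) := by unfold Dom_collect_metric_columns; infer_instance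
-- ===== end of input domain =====

-- B replaces A's two shaped passes (preferred filter + separate sorted of the leftovers) by one single ranked sort (idiomatic decomposition).

-- shared module constants
def pvIdFields : List String := ["nuisance", "channel", "process", "path"]
def pvPreferredMetrics : List String :=
  ["value_u", "value_d", "diff_u", "diff_d", "count", "items", "value"]

-- ===== PORT A =====
-- metrics-collection loop: 'for row in rows: for key in row: …'
def pvCollectMetrics (rows : List (List (String × String))) : PySem.Set String :=
  rows.foldl
    (fun metrics row =>
      row.foldl
        (fun metrics kv =>
          if kv.1 ∈ pvIdFields ∨ kv.1 = "severity" then metrics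
          else PySem.Set.add metrics kv.1)
        metrics)
    PySem.Set.empty

def collect_metric_columns (rows : List (List (String × String))) : List String :=
  let metrics := pvCollectMetrics rows
  let ordered := pvPreferredMetrics.filter (fun k => decide (k ∈ metrics))
  ordered ++
    PySem.List.sorted
      (metrics.filter (fun k => decide (k ∉ PySem.Set.ofList ordered)))
      (fun x => x) false

-- ===== PORT B =====
-- rank = {name: i for i, name in enumerate(PREFERRED_METRICS)}
def pvRank : PySem.Dict String Int :=
  (PySem.List.enumerate pvPreferredMetrics 0).foldl
    (fun d p => PySem.Dict.insert d p.2 p.1) PySem.Dict.empty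

def collect_metric_columns_alt (rows : List (List (String × String))) : List String :=
  let metrics := pvCollectMetrics rows
  PySem.List.sorted2 metrics
    (fun k => PySem.Dict.getD pvRank k (pvPreferredMetrics.length : Int))
    (fun k => k) false

-- ===== PRECONDITION & SPEC =====
def Spec_collect_metric_columns (rows : List (List (String × String))) (out : List String) : Prop := out = collect_metric_columns_alt rows
instance (rows : List (List (String × String))) (out : List String) : Decidable (Spec_collect_metric_columns rows out) := by unfold Spec_collect_metric_columns; infer_instance

-- ===== CLAIM (what is proved, stated in full; the proofs are below) =====
def Claim_equal_collect_metric_columns : Prop := ∀ (rows : List (List (String × String))), Dom_collect_metric_columns rows → Spec_collect_metric_columns rows (collect_metric_columns rows)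

-- ===== LEMMAS AND PROOFS =====

-- B's rank projection
def pvR (k : String) : Int := PySem.Dict.getD pvRank k (pvPreferredMetrics.length : Int)

-- B's tuple key, packaged as a single lexicographic key
def pvK (k : String) : Lex (Int × String) := toLex (pvR k, k)

lemma pvK_lt {a b : String} :
    pvK a < pvK b ↔ (pvR a < pvR b ∨ (pvR a = pvR b ∧ a < b)) := by
  simp [pvK, Prod.Lex.lt_iff]

-- the tuple-key sort is the single-key sort under pvK
lemma sorted2_eq_sorted_pvK (xs : List String) :
    PySem.List.sorted2 xs (fun k => pvR k) (fun k => k) false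
      = PySem.List.sorted xs pvK false := by
  rw [PySem.List.sorted_eq_foldl_insertBy]
  have h1 : PySem.List.sorted2 xs (fun k => pvR k) (fun k => k) false
      = xs.foldl (fun acc x => PySem.List.insertBy
          (fun a b => decide (pvR a < pvR b) || (!decide (pvR b < pvR a) && decide (a < b))) x acc) [] := rfl
  have h2 : (fun (acc : List String) x => PySem.List.insertBy
          (fun a b => decide (pvR a < pvR b) || (!decide (pvR b < pvR a) && decide (a < b))) x acc)
      = (fun acc x => PySem.List.insertBy (fun a b => decide (pvK a < pvK b)) x acc) := by
    funext acc x
    congr 1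
    funext a b
    rcases lt_trichotomy (pvR a) (pvR b) with h | h | h
    · simp [pvK_lt, h]
    · simp [pvK_lt, h]
    · have hna : ¬ pvR a < pvR b := not_lt_of_gt h
      simp [pvK_lt, hna, h, h.ne']
  rw [h1, h2]

lemma pvR_of_mem {k : String} (h : k ∈ pvPreferredMetrics) : pvR k < 7 := by
  fin_cases h <;> decide

lemma pvR_of_not_mem {k : String} (h : k ∉ pvPreferredMetrics) : pvR k = 7 := by
  simp only [pvPreferredMetrics, List.mem_cons, List.not_mem_nil, or_false, not_or] at h
  obtain ⟨h1, h2, h3, h4, h5, h6, h7⟩ := h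
  have b1 : ("value_u" == k) = false := by simp [Ne.symm h1]
  have b2 : ("value_d" == k) = false := by simp [Ne.symm h2]
  have b3 : ("diff_u" == k) = false := by simp [Ne.symm h3]
  have b4 : ("diff_d" == k) = false := by simp [Ne.symm h4]
  have b5 : ("count" == k) = false := by simp [Ne.symm h5]
  have b6 : ("items" == k) = false := by simp [Ne.symm h6]
  have b7 : ("value" == k) = false := by simp [Ne.symm h7]
  simp [pvR, pvRank, pvPreferredMetrics, PySem.List.enumerate, PySem.Dict.getD,
    PySem.Dict.get?, PySem.Dict.insert, PySem.Dict.empty, List.find?,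
    b1, b2, b3, b4, b5, b6, b7]

lemma pvPreferred_rank_pairwise :
    pvPreferredMetrics.Pairwise (fun a b => pvR a < pvR b) := by decide

lemma pvPreferred_nodup : pvPreferredMetrics.Nodup := by decide

lemma row_foldl_nodup (row : List (String × String)) (s : PySem.Set String) (h : s.Nodup) :
    (row.foldl
      (fun metrics kv =>
        if kv.1 ∈ pvIdFields ∨ kv.1 = "severity" then metrics
        else PySem.Set.add metrics kv.1) s).Nodup := by
  induction row generalizing s with
  | nil => exact h
  | cons kv t ih =>
    simp only [List.foldl_cons]
    split_ifs
    · exact ih _ h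
    · exact ih _ (PySem.Set.nodup_add s kv.1 h)

lemma metrics_nodup (rows : List (List (String × String))) :
    (pvCollectMetrics rows).Nodup := by
  unfold pvCollectMetrics
  generalize hs : (PySem.Set.empty : PySem.Set String) = s
  have h : s.Nodup := by rw [← hs]; exact List.nodup_nil
  clear hs
  induction rows generalizing s with
  | nil => exact h
  | cons row t ih =>
    simp only [List.foldl_cons]
    exact ih _ (row_foldl_nodup row s h)

theorem key_equiv (rows : List (List (String × String))) :
    collect_metric_columns rows = collect_metric_columns_alt rows := by
  unfold collect_metric_columns collect_metric_columns_alt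
  simp only []
  set M := pvCollectMetrics rows with hM
  have hndM : M.Nodup := metrics_nodup rows
  set ordered := pvPreferredMetrics.filter (fun k => decide (k ∈ M)) with hord
  have hmem_ord : ∀ k, k ∈ ordered ↔ k ∈ pvPreferredMetrics ∧ k ∈ M := by
    intro k; simp [hord, List.mem_filter]
  -- the second filter is, on elements of M, the complement-of-preferred filter
  have hrest : M.filter (fun k => decide (k ∉ PySem.Set.ofList ordered))
      = M.filter (fun k => decide (k ∉ pvPreferredMetrics)) := by
    apply List.filter_congr
    intro x hx
    simp only [decide_eq_decide, PySem.Set.mem_ofList, hmem_ord]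
    tauto
  rw [hrest]
  set rest := M.filter (fun k => decide (k ∉ pvPreferredMetrics)) with hrestdef
  have hmem_rest : ∀ k, k ∈ rest ↔ k ∈ M ∧ k ∉ pvPreferredMetrics := by
    intro k; simp [hrestdef, List.mem_filter]
  set S := PySem.List.sorted rest (fun x => x) false with hS
  have hmem_S : ∀ k, k ∈ S ↔ k ∈ M ∧ k ∉ pvPreferredMetrics := by
    intro k; rw [hS, PySem.List.mem_sorted]; exact hmem_rest k
  have hnd_ord : ordered.Nodup := List.Nodup.filter _ pvPreferred_nodup
  have hnd_rest : rest.Nodup := List.Nodup.filter _ hndM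
  have hnd_S : S.Nodup := ((PySem.List.sorted_perm rest (fun x => x) false).nodup_iff).mpr hnd_rest
  -- B's single-key sort equals A's concatenation
  have hRdef : (fun k => PySem.Dict.getD pvRank k (pvPreferredMetrics.length : Int)) = (fun k => pvR k) := rfl
  rw [hRdef, sorted2_eq_sorted_pvK]
  apply Eq.symm
  apply PySem.List.sorted_eq_of_perm_of_pairwise_lt
  · -- permutation
    apply (List.perm_ext_iff_of_nodup _ hndM).mpr
    · intro a
      simp only [List.mem_append, hmem_ord a, hmem_S a]
      by_cases hp : a ∈ pvPreferredMetrics <;> by_cases hm : a ∈ M <;> simp [hp, hm]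
    · apply List.Nodup.append hnd_ord hnd_S
      intro a ha hb
      exact ((hmem_S a).mp hb).2 ((hmem_ord a).mp ha).1
  · -- pairwise strictly increasing under pvK
    apply List.pairwise_append.mpr
    refine ⟨?_, ?_, ?_⟩
    · -- within the preferred part: strictly increasing ranks
      have := List.Pairwise.filter (p := fun k => decide (k ∈ M)) pvPreferred_rank_pairwise
      exact this.imp (fun h => pvK_lt.mpr (Or.inl h))
    · -- within the sorted leftover part: equal ranks, strictly increasing strings
      have hle : S.Pairwise (fun a b => a ≤ b) := PySem.List.sorted_pairwise rest (fun x => x)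
      have hne : S.Pairwise (fun a b => a ≠ b) := hnd_S
      have hlt : S.Pairwise (fun a b => a < b) :=
        (hle.and hne).imp (fun h => lt_of_le_of_ne h.1 h.2)
      apply List.Pairwise.imp_of_mem ?_ hlt
      intro a b ha hb h
      have h7a := pvR_of_not_mem ((hmem_S a).mp ha).2
      have h7b := pvR_of_not_mem ((hmem_S b).mp hb).2
      exact pvK_lt.mpr (Or.inr ⟨h7a.trans h7b.symm, h⟩)
    · -- across the parts: rank < 7 = rank
      intro a ha b hb
      have h1 := pvR_of_mem ((hmem_ord a).mp ha).1
      have h2 := pvR_of_not_mem ((hmem_S b).mp hb).2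
      exact pvK_lt.mpr (Or.inl (by omega))

-- ===== VERDICT (by name: the statement is the Claim_ definition above) =====
theorem collect_metric_columns_spec : Claim_equal_collect_metric_columns := by
  intro rows _
  unfold Spec_collect_metric_columns
  exact key_equiv rows
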